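-- pv_equiv track=rewrite | github.com/Ag3497120/verantyx-v6 | arc/world_commands.py | grow_8
-- ===== SOURCE A (Python) =====
-- from collections import Counter, defaultdict
--
-- def _bg(g):
--     c = Counter()
--     for row in g: c.update(row)
--     return c.most_common(1)[0][0]
--
-- def _copy(g):
--     return [row[:] for row in g]
--
-- def grow_8(g):
--     bg=_bg(g); h,w=len(g),len(g[0]); res=_copy(g)
--     for r in range(h):
--         for c in range(w):
--             if g[r][c]!=bg:
--                 for dr in [-1,0,1]:
--                     for dc in [-1,0,1]:
--                         nr,nc=r+dr,c+dc
--                         if 0<=nr<h and 0<=nc<w and res[nr][nc]==bg: res[nr][nc]=g[r][c]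
--     return res
-- ===== SOURCE B (Python) =====
-- from collections import Counter
--
-- def _bg(g):
--     c = Counter()
--     for row in g: c.update(row)
--     return c.most_common(1)[0][0]
--
-- def grow_8(g):
--     # pull/gather formulation: each background cell takes the value of its first
--     # (row-major) in-bounds non-background neighbour; non-background cells keep theirs.
--     bg = _bg(g); h, w = len(g), len(g[0])
--     def pick(r, c):
--         if g[r][c] != bg:
--             return g[r][c]
--         return next((g[r+dr][c+dc]
--                      for dr in (-1, 0, 1) for dc in (-1, 0, 1)
--                      if 0 <= r+dr < h and 0 <= c+dc < w and g[r+dr][c+dc] != bg),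
--                     bg)
--     return [[pick(r, c) for c in range(w)] for r in range(h)]
-- ===== Notes on version B (the rewrite author's own statement) =====
-- stated objective: alternative
-- what changed: A scatters: it mutates a copied grid, each non-background cell writing into still-background neighbours with first-writer-wins; B gathers: it builds the result as a pure nested comprehension where each background cell pulls the value of its first in-bounds non-background neighbour in row-major offset order, with no mutation. …
-- outside the precondition, e.g. on grow_8([[0, 0], [0, 1, 5]]): A returns [[1, 1], [1, 1, 5]], B returns [[1, 1], [1, 1]]
import Mathlib
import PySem

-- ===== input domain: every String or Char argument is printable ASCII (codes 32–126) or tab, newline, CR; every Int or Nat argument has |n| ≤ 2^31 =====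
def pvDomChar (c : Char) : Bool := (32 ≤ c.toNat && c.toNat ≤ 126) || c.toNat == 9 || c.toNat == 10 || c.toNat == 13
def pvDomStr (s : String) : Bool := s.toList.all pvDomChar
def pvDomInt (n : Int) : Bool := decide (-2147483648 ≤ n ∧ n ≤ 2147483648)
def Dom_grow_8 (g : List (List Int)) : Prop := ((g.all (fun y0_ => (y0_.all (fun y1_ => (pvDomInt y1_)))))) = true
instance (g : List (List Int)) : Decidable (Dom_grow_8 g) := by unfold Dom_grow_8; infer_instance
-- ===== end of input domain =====

-- B replaces A's mutating scatter (copy the grid, every non-background cell overwrites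
-- still-background neighbours, first writer wins) by a pure gather comprehension (each
-- background cell pulls its first in-bounds non-background neighbour in row-major offset
-- order); same cost, no mutation.

-- ===== PORT A =====
-- _bg: Counter over all rows, then most_common(1)[0][0] = the first-inserted key of
-- maximal count (Counter.most_common sorts by descending count, stably).
def bgOf (g : List (List Int)) : Int :=
  let cnt : PySem.Dict Int Int :=
    g.foldl (fun d row => row.foldl (fun d x => d.modify x 0 (· + 1)) d) PySem.Dict.empty
  match cnt.items with
  | [] => 0   -- Python raises IndexError here (excluded by Pre_grow_8)
  | kv :: rest => (rest.foldl (fun best kv => if kv.2 > best.2 then kv else best) kv).1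

-- g[r][c] for in-range Nat indices (every access in both ports is in range under Pre_)
def idx2 (g : List (List Int)) (r c : Nat) : Int := (g.getD r []).getD c 0
-- res[r][c] = v
def set2 (g : List (List Int)) (r c : Nat) (v : Int) : List (List Int) :=
  g.set r ((g.getD r []).set c v)

def grow_8 (g : List (List Int)) : List (List Int) :=
  let bg := bgOf g
  let h := g.length
  let w := (g.headD []).length
  let res := g.map (fun row => row)   -- _copy
  (List.range h).foldl (fun res r =>
    (List.range w).foldl (fun res c =>
      if idx2 g r c ≠ bg then
        ([-1, 0, 1] : List Int).foldl (fun res dr =>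
          ([-1, 0, 1] : List Int).foldl (fun res dc =>
            let nr : Int := (r : Int) + dr
            let nc : Int := (c : Int) + dc
            if 0 ≤ nr ∧ nr < (h : Int) ∧ 0 ≤ nc ∧ nc < (w : Int) ∧
                idx2 res nr.toNat nc.toNat = bg then
              set2 res nr.toNat nc.toNat (idx2 g r c)
            else res) res) res
      else res) res) res

-- ===== PORT B =====
-- pick(r, c) of Source B: a non-background cell keeps its value; a background cell takes the
-- first in-bounds non-background neighbour in (dr, dc) row-major order (next(..., bg)).
def pickB (g : List (List Int)) (bg : Int) (h w : Nat) (r c : Nat) : Int :=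
  if idx2 g r c ≠ bg then idx2 g r c
  else
    ((([-1, 0, 1] : List Int).flatMap (fun dr =>
        ([-1, 0, 1] : List Int).map (fun dc => (dr, dc)))).findSome? (fun o =>
          let nr : Int := (r : Int) + o.1
          let nc : Int := (c : Int) + o.2
          if 0 ≤ nr ∧ nr < (h : Int) ∧ 0 ≤ nc ∧ nc < (w : Int) ∧
              idx2 g nr.toNat nc.toNat ≠ bg then
            some (idx2 g nr.toNat nc.toNat)
          else none)).getD bg

def grow_8_alt (g : List (List Int)) : List (List Int) :=
  let bg := bgOf g
  let h := g.length
  let w := (g.headD []).length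
  (List.range h).map (fun r => (List.range w).map (fun c => pickB g bg h w r c))

-- ===== PRECONDITION & SPEC =====
-- Pre_ admits only non-empty rectangular grids: A raises IndexError on the empty grid, on a
-- grid of empty rows, and on grids with a row shorter than the first; on ragged grids with
-- rows longer than the first A returns, but its leaving the extra columns untouched is an
-- accident of its width-of-first-row loop bound, so those grids are excluded too.
def Pre_grow_8 (g : List (List Int)) : Prop :=
  g ≠ [] ∧ (g.headD []).length ≠ 0 ∧ ∀ row ∈ g, row.length = (g.headD []).length
instance (g : List (List Int)) : Decidable (Pre_grow_8 g) := by unfold Pre_grow_8; infer_instance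

def pvWitness_grow_8 : List (List Int) := [[0, 0, 0], [0, 1, 0], [0, 0, 2]]

def Spec_grow_8 (g : List (List Int)) (out : List (List Int)) : Prop := out = grow_8_alt g
instance (g : List (List Int)) (out : List (List Int)) : Decidable (Spec_grow_8 g out) := by
  unfold Spec_grow_8; infer_instance

-- ===== CLAIM (what is proved, stated in full; the proofs are below) =====
def Claim_equal_grow_8 : Prop := ∀ (g : List (List Int)), Dom_grow_8 g → Pre_grow_8 g → Spec_grow_8 g (grow_8 g)

-- ===== LEMMAS AND PROOFS =====

-- row-major (lexicographic) order on cells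
def lexLt (a b : Nat × Nat) : Prop := a.1 < b.1 ∨ (a.1 = b.1 ∧ a.2 < b.2)

-- the grid whose (i, j) entry is f i j for j < w, keeping g's row tails beyond column w
def gridOfT (g : List (List Int)) (h w : Nat) (f : Nat → Nat → Int) : List (List Int) :=
  (List.range h).map (fun i => (List.range w).map (f i) ++ (g.getD i []).drop w)

-- s is in the 3x3 box around (i, j)
def adjP (i j : Nat) (s : Nat × Nat) : Bool :=
  ((s.1 : Int) - i).natAbs ≤ 1 && ((s.2 : Int) - j).natAbs ≤ 1

def writerTo (g : List (List Int)) (bg : Int) (i j : Nat) (s : Nat × Nat) : Option Int :=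
  if adjP i j s ∧ idx2 g s.1 s.2 ≠ bg then some (idx2 g s.1 s.2) else none

-- value of cell (i, j) after the sources in p (in order) have scattered
def valA (g : List (List Int)) (bg : Int) (p : List (Nat × Nat)) (i j : Nat) : Int :=
  if idx2 g i j ≠ bg then idx2 g i j else ((p.findSome? (writerTo g bg i j)).getD bg)

def matcher (s : Nat × Nat) (i j : Nat) (o : Int × Int) : Bool :=
  decide ((i : Int) = s.1 + o.1 ∧ (j : Int) = s.2 + o.2)

-- value of cell (i, j) after p has scattered and source s has processed the offsets in os
def mixV (g : List (List Int)) (bg : Int) (p : List (Nat × Nat)) (s : Nat × Nat)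
    (os : List (Int × Int)) (i j : Nat) : Int :=
  if valA g bg p i j = bg ∧ os.any (matcher s i j) then idx2 g s.1 s.2 else valA g bg p i j

def offs : List (Int × Int) :=
  [(-1, -1), (-1, 0), (-1, 1), (0, -1), (0, 0), (0, 1), (1, -1), (1, 0), (1, 1)]

def srcs (h w : Nat) : List (Nat × Nat) :=
  (List.range h).flatMap (fun r => (List.range w).map (fun c => (r, c)))

-- A's per-offset write step, for source s
def wstep (g : List (List Int)) (bg : Int) (h w : Nat) (s : Nat × Nat)
    (res : List (List Int)) (o : Int × Int) : List (List Int) :=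
  if 0 ≤ (s.1 : Int) + o.1 ∧ (s.1 : Int) + o.1 < (h : Int) ∧ 0 ≤ (s.2 : Int) + o.2 ∧
      (s.2 : Int) + o.2 < (w : Int) ∧
      idx2 res ((s.1 : Int) + o.1).toNat ((s.2 : Int) + o.2).toNat = bg then
    set2 res ((s.1 : Int) + o.1).toNat ((s.2 : Int) + o.2).toNat (idx2 g s.1 s.2)
  else res

-- A's per-source step
def cstep (g : List (List Int)) (bg : Int) (h w : Nat)
    (res : List (List Int)) (s : Nat × Nat) : List (List Int) :=
  if idx2 g s.1 s.2 ≠ bg then offs.foldl (wstep g bg h w s) res else res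

theorem map_range_set {α : Type} (n : Nat) (f : Nat → α) (i : Nat) (x : α) :
    ((List.range n).map f).set i x = (List.range n).map (fun k => if k = i then x else f k) := by
  apply List.ext_getElem
  · simp
  · intro k h1 h2
    simp only [List.getElem_set, List.getElem_map, List.getElem_range]
    simp only [List.length_set, List.length_map, List.length_range] at h1
    split
    · simp_all
    · rename_i hne
      rw [if_neg (by omega)]

theorem idx2_gridOfT (g : List (List Int)) (h w : Nat) (f : Nat → Nat → Int) {i j : Nat}
    (hi : i < h) (hj : j < w) : idx2 (gridOfT g h w f) i j = f i j := by
  have hrow : (gridOfT g h w f).getD i [] = (List.range w).map (f i) ++ (g.getD i []).drop w := by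
    unfold gridOfT
    rw [List.getD_eq_getElem _ _ (by simpa using hi)]
    simp
  unfold idx2
  rw [hrow, List.getD_append _ _ _ _ (by simpa using hj),
      List.getD_eq_getElem _ _ (by simpa using hj)]
  simp

theorem gridOfT_congr (g : List (List Int)) (h w : Nat) (f f' : Nat → Nat → Int)
    (H : ∀ i < h, ∀ j < w, f i j = f' i j) : gridOfT g h w f = gridOfT g h w f' := by
  unfold gridOfT
  refine List.map_congr_left (fun i hi => ?_)
  refine congrArg (· ++ (g.getD i []).drop w) ?_
  refine List.map_congr_left (fun j hj => ?_)
  exact H i (by simpa using hi) j (by simpa using hj)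

theorem set2_gridOfT (g : List (List Int)) (h w : Nat) (f : Nat → Nat → Int) {i j : Nat}
    (hi : i < h) (hj : j < w) (v : Int) :
    set2 (gridOfT g h w f) i j v
      = gridOfT g h w (fun i' j' => if i' = i ∧ j' = j then v else f i' j') := by
  unfold set2 gridOfT
  rw [List.getD_eq_getElem _ _ (by simpa using hi), List.getElem_map, List.getElem_range]
  rw [List.set_append_left _ _ (by simpa using hj)]
  rw [map_range_set, map_range_set]
  refine List.map_congr_left (fun i' hi' => ?_)
  by_cases hii : i' = i
  · subst hii
    rw [if_pos rfl]
    refine congrArg (· ++ (g.getD i' []).drop w) ?_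
    refine List.map_congr_left (fun j' hj' => ?_)
    by_cases hjj : j' = j <;> simp [hjj]
  · rw [if_neg hii]
    refine congrArg (· ++ (g.getD i' []).drop w) ?_
    refine List.map_congr_left (fun j' hj' => ?_)
    simp [hii]

theorem mixV_eq_bg_iff (g : List (List Int)) (bg : Int) (p : List (Nat × Nat)) (s : Nat × Nat)
    (os : List (Int × Int)) (i j : Nat) (hsv : idx2 g s.1 s.2 ≠ bg) :
    mixV g bg p s os i j = bg ↔ (valA g bg p i j = bg ∧ os.any (matcher s i j) = false) := by
  unfold mixV
  split
  · rename_i hc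
    constructor
    · intro hb; exact absurd hb hsv
    · intro hb; rw [hb.2] at hc; simp at hc
  · rename_i hc
    constructor
    · intro hb
      refine ⟨hb, ?_⟩
      by_cases ha : (os.any (matcher s i j)) = true
      · exact absurd ⟨hb, ha⟩ hc
      · simpa using ha
    · exact fun hb => hb.1

theorem wstep_mix (g : List (List Int)) (bg : Int) (h w : Nat) (s : Nat × Nat)
    (hs1 : s.1 < h) (hs2 : s.2 < w) (hsv : idx2 g s.1 s.2 ≠ bg)
    (p : List (Nat × Nat)) (os : List (Int × Int)) (o : Int × Int) :
    wstep g bg h w s (gridOfT g h w (mixV g bg p s os)) o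
      = gridOfT g h w (mixV g bg p s (os ++ [o])) := by
  unfold wstep
  by_cases hb : 0 ≤ (s.1 : Int) + o.1 ∧ (s.1 : Int) + o.1 < (h : Int) ∧
      0 ≤ (s.2 : Int) + o.2 ∧ (s.2 : Int) + o.2 < (w : Int)
  · obtain ⟨h1, h2, h3, h4⟩ := hb
    have hi0h : ((s.1 : Int) + o.1).toNat < h := by omega
    have hj0w : ((s.2 : Int) + o.2).toNat < w := by omega
    rw [idx2_gridOfT g h w _ hi0h hj0w]
    by_cases hbg : mixV g bg p s os ((s.1 : Int) + o.1).toNat ((s.2 : Int) + o.2).toNat = bg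
    · rw [if_pos ⟨h1, h2, h3, h4, hbg⟩]
      rw [set2_gridOfT g h w _ hi0h hj0w]
      apply gridOfT_congr; intro i hi j hj
      by_cases ht : i = ((s.1 : Int) + o.1).toNat ∧ j = ((s.2 : Int) + o.2).toNat
      · obtain ⟨rfl, rfl⟩ := ht
        rw [if_pos ⟨rfl, rfl⟩]
        have hm0 : matcher s ((s.1 : Int) + o.1).toNat ((s.2 : Int) + o.2).toNat o = true := by
          simp only [matcher, decide_eq_true_eq]; omega
        have hvv := (mixV_eq_bg_iff g bg p s os _ _ hsv).mp hbg
        unfold mixV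
        rw [List.any_append, hvv.1]
        simp [hm0]
      · rw [if_neg ht]
        have hm : matcher s i j o = false := by
          simp only [matcher, decide_eq_false_iff_not]
          intro hc; exact ht ⟨by omega, by omega⟩
        unfold mixV; rw [List.any_append, List.any_cons, List.any_nil, hm, Bool.or_false, Bool.or_false]
    · rw [if_neg (by tauto)]
      apply gridOfT_congr; intro i hi j hj
      by_cases ht : i = ((s.1 : Int) + o.1).toNat ∧ j = ((s.2 : Int) + o.2).toNat
      · obtain ⟨rfl, rfl⟩ := ht
        by_cases hv : valA g bg p ((s.1 : Int) + o.1).toNat ((s.2 : Int) + o.2).toNat = bg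
        · have hany : os.any (matcher s ((s.1 : Int) + o.1).toNat ((s.2 : Int) + o.2).toNat) = true := by
            by_contra hcon
            exact hbg ((mixV_eq_bg_iff g bg p s os _ _ hsv).mpr ⟨hv, by simpa using hcon⟩)
          unfold mixV
          rw [List.any_append, hany]
          simp [hv, hany]
        · unfold mixV
          rw [List.any_append]
          simp [hv]
      · have hm : matcher s i j o = false := by
          simp only [matcher, decide_eq_false_iff_not]
          intro hc; exact ht ⟨by omega, by omega⟩
        unfold mixV; rw [List.any_append, List.any_cons, List.any_nil, hm, Bool.or_false, Bool.or_false]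
  · rw [if_neg (by tauto)]
    apply gridOfT_congr; intro i hi j hj
    have hm : matcher s i j o = false := by
      simp only [matcher, decide_eq_false_iff_not]
      intro hc
      exact hb ⟨by omega, by omega, by omega, by omega⟩
    unfold mixV; rw [List.any_append, List.any_cons, List.any_nil, hm, Bool.or_false, Bool.or_false]

theorem foldl_wstep_mix (g : List (List Int)) (bg : Int) (h w : Nat) (s : Nat × Nat)
    (hs1 : s.1 < h) (hs2 : s.2 < w) (hsv : idx2 g s.1 s.2 ≠ bg)
    (p : List (Nat × Nat)) :
    ∀ (os' os : List (Int × Int)),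
      os'.foldl (wstep g bg h w s) (gridOfT g h w (mixV g bg p s os))
        = gridOfT g h w (mixV g bg p s (os ++ os')) := by
  intro os'
  induction os' with
  | nil => intro os; simp
  | cons o rest ih =>
    intro os
    rw [List.foldl_cons, wstep_mix g bg h w s hs1 hs2 hsv p os o, ih (os ++ [o]),
        List.append_assoc]
    rfl

theorem findSome?_writerTo_ne (g : List (List Int)) (bg : Int) (i j : Nat)
    (p : List (Nat × Nat)) {v : Int} (hv : p.findSome? (writerTo g bg i j) = some v) :
    v ≠ bg := by
  obtain ⟨a, _, ha⟩ := List.exists_of_findSome?_eq_some hv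
  unfold writerTo at ha
  split at ha
  · rename_i hc
    obtain rfl : idx2 g a.1 a.2 = v := by simpa using ha
    exact hc.2
  · simp at ha

theorem any_offs_matcher (s : Nat × Nat) (i j : Nat) :
    offs.any (matcher s i j) = adjP i j s := by
  rw [Bool.eq_iff_iff]
  simp only [offs, matcher, adjP, List.any_cons, List.any_nil, Bool.or_eq_true,
    Bool.and_eq_true, decide_eq_true_eq, Bool.false_eq_true, or_false]
  omega

theorem mix_offs_eq_snoc (g : List (List Int)) (bg : Int) (h w : Nat) (s : Nat × Nat)
    (hsv : idx2 g s.1 s.2 ≠ bg) (p : List (Nat × Nat)) :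
    gridOfT g h w (mixV g bg p s offs) = gridOfT g h w (valA g bg (p ++ [s])) := by
  apply gridOfT_congr; intro i hi j hj
  by_cases hg : idx2 g i j = bg
  · have hv : valA g bg p i j = (List.findSome? (writerTo g bg i j) p).getD bg := by
      unfold valA; rw [if_neg (by simpa using hg)]
    cases hfs : List.findSome? (writerTo g bg i j) p with
    | some v =>
      have hvne := findSome?_writerTo_ne g bg i j p hfs
      have hL1 : valA g bg p i j = v := by rw [hv, hfs]; rfl
      have hR : valA g bg (p ++ [s]) i j = v := by
        unfold valA
        rw [if_neg (by simpa using hg), List.findSome?_append, hfs]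
        rfl
      unfold mixV
      rw [hL1, hR, if_neg (fun hc => hvne hc.1)]
    | none =>
      have hL1 : valA g bg p i j = bg := by rw [hv, hfs]; rfl
      have hR : valA g bg (p ++ [s]) i j = (writerTo g bg i j s).getD bg := by
        unfold valA
        rw [if_neg (by simpa using hg), List.findSome?_append, hfs]
        cases hw : writerTo g bg i j s <;> simp [List.findSome?_cons, hw]
      unfold mixV
      rw [hL1, hR, any_offs_matcher]
      by_cases hadj : adjP i j s = true
      · rw [if_pos ⟨rfl, hadj⟩]
        unfold writerTo
        rw [if_pos ⟨hadj, hsv⟩]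
        rfl
      · rw [if_neg (fun hc => hadj hc.2)]
        unfold writerTo
        rw [if_neg (fun hc => hadj hc.1)]
        rfl
  · have hL1 : valA g bg p i j = idx2 g i j := by unfold valA; rw [if_pos hg]
    have hR : valA g bg (p ++ [s]) i j = idx2 g i j := by unfold valA; rw [if_pos hg]
    unfold mixV
    rw [hL1, hR, if_neg (fun hc => hg hc.1)]

theorem cstep_snoc (g : List (List Int)) (bg : Int) (h w : Nat) (s : Nat × Nat)
    (hs1 : s.1 < h) (hs2 : s.2 < w) (p : List (Nat × Nat)) :
    cstep g bg h w (gridOfT g h w (valA g bg p)) s = gridOfT g h w (valA g bg (p ++ [s])) := by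
  unfold cstep
  by_cases hsv : idx2 g s.1 s.2 ≠ bg
  · rw [if_pos hsv]
    have h0 : gridOfT g h w (valA g bg p) = gridOfT g h w (mixV g bg p s []) := by
      apply gridOfT_congr; intro i hi j hj; unfold mixV; simp
    rw [h0, foldl_wstep_mix g bg h w s hs1 hs2 hsv p offs [], List.nil_append,
        mix_offs_eq_snoc g bg h w s hsv p]
  · rw [if_neg hsv]
    have hsv' : idx2 g s.1 s.2 = bg := by simpa using hsv
    apply gridOfT_congr; intro i hi j hj
    unfold valA
    rw [List.findSome?_append]
    have hw : writerTo g bg i j s = none := by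
      unfold writerTo
      rw [if_neg (fun hc => hc.2 hsv')]
    cases hfs : List.findSome? (writerTo g bg i j) p <;>
      simp [List.findSome?_cons, hw, hfs]

theorem foldl_cstep (g : List (List Int)) (bg : Int) (h w : Nat) :
    ∀ (q p : List (Nat × Nat)), (∀ s ∈ q, s.1 < h ∧ s.2 < w) →
      q.foldl (cstep g bg h w) (gridOfT g h w (valA g bg p)) = gridOfT g h w (valA g bg (p ++ q)) := by
  intro q
  induction q with
  | nil => intro p _; simp
  | cons s rest ih =>
    intro p hmem
    rw [List.foldl_cons, cstep_snoc g bg h w s (hmem s (by simp)).1 (hmem s (by simp)).2 p,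
        ih (p ++ [s]) (fun t ht => hmem t (by simp [ht])), List.append_assoc]
    rfl

theorem gridOfT_valA_nil (g : List (List Int)) (bg : Int)
    (hrect : ∀ row ∈ g, (g.headD []).length ≤ row.length) :
    gridOfT g g.length (g.headD []).length (valA g bg []) = g := by
  apply List.ext_getElem
  · simp [gridOfT]
  · intro i h1 h2
    simp only [gridOfT, List.getElem_map, List.getElem_range]
    have hlen : (g.headD []).length ≤ g[i].length := hrect g[i] (List.getElem_mem h2)
    have hgetD : g.getD i [] = g[i] := List.getD_eq_getElem g [] h2
    rw [hgetD]
    conv_rhs => rw [← List.take_append_drop (g.headD []).length g[i]]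
    refine congrArg (· ++ g[i].drop (g.headD []).length) ?_
    apply List.ext_getElem
    · simp only [List.length_map, List.length_range, List.length_take]
      omega
    · intro j h3 h4
      simp only [List.getElem_map, List.getElem_range, List.getElem_take]
      have h5 : j < g[i].length := by
        simp only [List.length_map, List.length_range] at h3
        omega
      have hidx : idx2 g i j = g[i][j] := by
        unfold idx2
        rw [List.getD_eq_getElem g [] h2, List.getD_eq_getElem _ 0 h5]
      unfold valA
      split
      · exact hidx
      · rename_i hc
        have hcc : idx2 g i j = bg := by simpa using hc
        rw [← hidx, ← hcc]
        rfl

theorem my_foldl_congr {α β : Type} (l : List α) (f f' : β → α → β) :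
    ∀ (init : β), (∀ b a, a ∈ l → f b a = f' b a) → l.foldl f init = l.foldl f' init := by
  induction l with
  | nil => intro init _; rfl
  | cons a l ih =>
    intro init hp
    rw [List.foldl_cons, List.foldl_cons, hp init a (by simp)]
    exact ih _ (fun b x hx => hp b x (by simp [hx]))

theorem inner_fold_eq (g : List (List Int)) (bg : Int) (h w : Nat) (r c : Nat)
    (res : List (List Int)) :
    ([-1, 0, 1] : List Int).foldl (fun res dr =>
      ([-1, 0, 1] : List Int).foldl (fun res dc =>
        let nr : Int := (r : Int) + dr
        let nc : Int := (c : Int) + dc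
        if 0 ≤ nr ∧ nr < (h : Int) ∧ 0 ≤ nc ∧ nc < (w : Int) ∧
            idx2 res nr.toNat nc.toNat = bg then
          set2 res nr.toNat nc.toNat (idx2 g r c)
        else res) res) res
      = offs.foldl (wstep g bg h w (r, c)) res := by
  have h1 : offs.foldl (wstep g bg h w (r, c)) res
      = (([-1, 0, 1] : List Int).flatMap (fun dr =>
          ([-1, 0, 1] : List Int).map (fun dc => (dr, dc)))).foldl
            (wstep g bg h w (r, c)) res := by
    rw [show (([-1, 0, 1] : List Int).flatMap (fun dr =>
      ([-1, 0, 1] : List Int).map (fun dc => (dr, dc)))) = offs from rfl]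
  rw [h1, List.foldl_flatMap]
  simp only [List.foldl_map]
  apply my_foldl_congr
  intro b dr _
  apply my_foldl_congr
  intro b' dc _
  show _ = wstep g bg h w (r, c) b' (dr, dc)
  unfold wstep
  rfl

theorem nested_eq_srcs_foldl (g : List (List Int)) (bg : Int) (h w : Nat)
    (init : List (List Int)) :
    (List.range h).foldl (fun res r =>
      (List.range w).foldl (fun res c =>
        if idx2 g r c ≠ bg then
          ([-1, 0, 1] : List Int).foldl (fun res dr =>
            ([-1, 0, 1] : List Int).foldl (fun res dc =>
              let nr : Int := (r : Int) + dr
              let nc : Int := (c : Int) + dc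
              if 0 ≤ nr ∧ nr < (h : Int) ∧ 0 ≤ nc ∧ nc < (w : Int) ∧
                  idx2 res nr.toNat nc.toNat = bg then
                set2 res nr.toNat nc.toNat (idx2 g r c)
              else res) res) res
        else res) res) init
      = (srcs h w).foldl (cstep g bg h w) init := by
  unfold srcs
  rw [List.foldl_flatMap]
  apply my_foldl_congr _ _ _ init
  intro res r _
  rw [List.foldl_map]
  apply my_foldl_congr _ _ _ res
  intro res' c _
  show (if idx2 g r c ≠ bg then _ else res') = cstep g bg h w res' (r, c)
  unfold cstep
  by_cases hc : idx2 g r c ≠ bg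
  · rw [if_pos hc, if_pos hc]
    exact inner_fold_eq g bg h w r c res'
  · rw [if_neg hc, if_neg hc]

theorem grow_8_eq_gridOf (g : List (List Int)) (hpre : Pre_grow_8 g) :
    grow_8 g = gridOfT g g.length (g.headD []).length
      (valA g (bgOf g) (srcs g.length (g.headD []).length)) := by
  obtain ⟨hne, hw0, hrect⟩ := hpre
  have hbnd : ∀ s ∈ srcs g.length (g.headD []).length,
      s.1 < g.length ∧ s.2 < (g.headD []).length := by
    intro s hs
    simp only [srcs, List.mem_flatMap, List.mem_map, List.mem_range] at hs
    obtain ⟨r, hr, c, hc, rfl⟩ := hs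
    exact ⟨hr, hc⟩
  have hfold := foldl_cstep g (bgOf g) g.length (g.headD []).length
    (srcs g.length (g.headD []).length) [] hbnd
  rw [gridOfT_valA_nil g (bgOf g) (fun row hrow => le_of_eq (hrect row hrow).symm),
      List.nil_append] at hfold
  calc grow_8 g
      = (srcs g.length (g.headD []).length).foldl
          (cstep g (bgOf g) g.length (g.headD []).length) (g.map (fun row => row)) :=
        nested_eq_srcs_foldl g (bgOf g) g.length (g.headD []).length (g.map (fun row => row))
    _ = (srcs g.length (g.headD []).length).foldl
          (cstep g (bgOf g) g.length (g.headD []).length) g := by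
        rw [show g.map (fun row => row) = g from by simp]
    _ = _ := hfold

-- === crux: first writer in row-major source order = first non-bg neighbour in offset order ===

theorem findSome?_filter_support {α β : Type} (f : α → Option β) (p : α → Bool)
    (hp : ∀ a, f a ≠ none → p a = true) :
    ∀ l : List α, (l.filter p).findSome? f = l.findSome? f := by
  intro l
  induction l with
  | nil => simp
  | cons a l ih =>
    by_cases hpa : p a = true
    · rw [List.filter_cons_of_pos hpa]
      cases hfa : f a <;> simp [List.findSome?_cons, hfa, ih]
    · have hfa : f a = none := by
        by_contra hfn
        exact hpa (hp a hfn)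
      rw [List.filter_cons_of_neg (by simpa using hpa)]
      simp [List.findSome?_cons, hfa, ih]

theorem findSome?_congr_mem {α β : Type} (f f' : α → Option β) :
    ∀ l : List α, (∀ a ∈ l, f a = f' a) → l.findSome? f = l.findSome? f' := by
  intro l
  induction l with
  | nil => intro _; simp
  | cons a l ih =>
    intro hmem
    have h1 : f a = f' a := hmem a (by simp)
    have h2 := ih (fun b hb => hmem b (by simp [hb]))
    cases hfa : f' a <;> simp [List.findSome?_cons, h1, hfa, h2]

theorem findSome?_filterMap {α β γ : Type} (t : α → Option β) (f : β → Option γ) :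
    ∀ l : List α, (l.filterMap t).findSome? f = l.findSome? (fun a => (t a).bind f) := by
  intro l
  induction l with
  | nil => simp
  | cons a l ih =>
    rw [List.filterMap_cons]
    cases hta : t a with
    | none => simp [List.findSome?_cons, hta, ih]
    | some b => cases hfb : f b <;> simp [List.findSome?_cons, hta, hfb, ih]

def toCell (i j h w : Nat) (o : Int × Int) : Option (Nat × Nat) :=
  if 0 ≤ (i : Int) + o.1 ∧ (i : Int) + o.1 < (h : Int) ∧ 0 ≤ (j : Int) + o.2 ∧
      (j : Int) + o.2 < (w : Int) then
    some (((i : Int) + o.1).toNat, ((j : Int) + o.2).toNat)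
  else none

theorem lex_eq_of_mem_iff :
    ∀ (l₁ l₂ : List (Nat × Nat)), l₁.Pairwise lexLt → l₂.Pairwise lexLt →
      (∀ a, a ∈ l₁ ↔ a ∈ l₂) → l₁ = l₂ := by
  intro l₁
  induction l₁ with
  | nil =>
    intro l₂ _ _ hmem
    cases l₂ with
    | nil => rfl
    | cons b l₂ => exact absurd ((hmem b).mpr (by simp)) (by simp)
  | cons a l₁ ih =>
    intro l₂ hp1 hp2 hmem
    cases l₂ with
    | nil => exact absurd ((hmem a).mp (by simp)) (by simp)
    | cons b l₂ =>
      have hab : a = b := by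
        have ha2 : a ∈ b :: l₂ := (hmem a).mp (by simp)
        have hb1 : b ∈ a :: l₁ := (hmem b).mpr (by simp)
        rcases List.mem_cons.mp ha2 with h | h
        · exact h
        · rcases List.mem_cons.mp hb1 with h' | h'
          · exact h'.symm
          · have h1 : lexLt a b := List.rel_of_pairwise_cons hp1 h'
            have h2 : lexLt b a := List.rel_of_pairwise_cons hp2 h
            unfold lexLt at h1 h2
            exfalso
            omega
      subst hab
      have htail : ∀ x, x ∈ l₁ ↔ x ∈ l₂ := by
        intro x
        constructor
        · intro hx
          have hlt := List.rel_of_pairwise_cons hp1 hx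
          rcases List.mem_cons.mp ((hmem x).mp (by simp [hx])) with h | h
          · exfalso; subst h; unfold lexLt at hlt; omega
          · exact h
        · intro hx
          have hlt := List.rel_of_pairwise_cons hp2 hx
          rcases List.mem_cons.mp ((hmem x).mpr (by simp [hx])) with h | h
          · exfalso; subst h; unfold lexLt at hlt; omega
          · exact h
      rw [ih l₂ (List.pairwise_cons.mp hp1).2 (List.pairwise_cons.mp hp2).2 htail]

theorem pairwise_srcs (h w : Nat) : (srcs h w).Pairwise lexLt := by
  induction h with
  | zero => simp [srcs]
  | succ n ih =>
    have hsplit : srcs (n + 1) w = srcs n w ++ (List.range w).map (fun c => (n, c)) := by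
      unfold srcs
      rw [List.range_succ, List.flatMap_append]
      simp
    rw [hsplit, List.pairwise_append]
    refine ⟨ih, ?_, ?_⟩
    · rw [List.pairwise_map]
      exact List.pairwise_lt_range.imp (fun hlt => Or.inr ⟨rfl, hlt⟩)
    · intro a ha b hb
      simp only [srcs, List.mem_flatMap, List.mem_map, List.mem_range] at ha
      simp only [List.mem_map, List.mem_range] at hb
      obtain ⟨r, hr, c, hc, rfl⟩ := ha
      obtain ⟨c', hc', rfl⟩ := hb
      exact Or.inl hr

theorem mem_offs (o : Int × Int) : o ∈ offs ↔ (o.1.natAbs ≤ 1 ∧ o.2.natAbs ≤ 1) := by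
  constructor
  · intro h
    fin_cases h <;> simp
  · rintro ⟨h1, h2⟩
    obtain ⟨a, b⟩ := o
    simp only at h1 h2
    have ha : a = -1 ∨ a = 0 ∨ a = 1 := by omega
    have hb : b = -1 ∨ b = 0 ∨ b = 1 := by omega
    rcases ha with rfl | rfl | rfl <;> rcases hb with rfl | rfl | rfl <;> simp [offs]

theorem pairwise_box (i j h w : Nat) : (offs.filterMap (toCell i j h w)).Pairwise lexLt := by
  have hoff : offs.Pairwise (fun o o' => o.1 < o'.1 ∨ (o.1 = o'.1 ∧ o.2 < o'.2)) := by decide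
  rw [List.pairwise_filterMap]
  refine hoff.imp ?_
  intro o o' hlt x hx y hy
  unfold toCell at hx hy
  rw [Option.ite_none_right_eq_some] at hx hy
  obtain ⟨hb1, hx⟩ := hx
  obtain ⟨hb2, hy⟩ := hy
  obtain rfl := Option.some.inj hx
  obtain rfl := Option.some.inj hy
  unfold lexLt
  simp only
  omega

theorem mem_filter_srcs (i j h w : Nat) (s : Nat × Nat) :
    s ∈ (srcs h w).filter (adjP i j) ↔ s ∈ offs.filterMap (toCell i j h w) := by
  constructor
  · intro hs
    obtain ⟨hmem, hadj⟩ := List.mem_filter.mp hs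
    simp only [srcs, List.mem_flatMap, List.mem_map, List.mem_range] at hmem
    obtain ⟨r, hr, c, hc, rfl⟩ := hmem
    simp only [adjP, Bool.and_eq_true, decide_eq_true_eq] at hadj
    rw [List.mem_filterMap]
    refine ⟨((r : Int) - i, (c : Int) - j), ?_, ?_⟩
    · rw [mem_offs]
      exact ⟨by simpa using hadj.1, by simpa using hadj.2⟩
    · unfold toCell
      rw [if_pos (by constructor <;> [omega; constructor <;> [omega; constructor <;> omega]])]
      simp only [Option.some.injEq, Prod.mk.injEq]
      constructor <;> omega
  · intro hs
    obtain ⟨o, ho, hcell⟩ := List.mem_filterMap.mp hs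
    have hoabs := (mem_offs o).mp ho
    unfold toCell at hcell
    rw [Option.ite_none_right_eq_some] at hcell
    obtain ⟨hb, hcell⟩ := hcell
    obtain rfl := Option.some.inj hcell
    rw [List.mem_filter]
    constructor
    · simp only [srcs, List.mem_flatMap, List.mem_map, List.mem_range]
      exact ⟨((i : Int) + o.1).toNat, by omega, ((j : Int) + o.2).toNat, by omega, rfl⟩
    · simp only [adjP, Bool.and_eq_true, decide_eq_true_eq]
      constructor <;> [simp; simp] <;> omega

theorem box_eq (i j h w : Nat) :
    (srcs h w).filter (adjP i j) = offs.filterMap (toCell i j h w) := by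
  apply lex_eq_of_mem_iff
  · exact List.Pairwise.sublist List.filter_sublist (pairwise_srcs h w)
  · exact pairwise_box i j h w
  · exact fun a => mem_filter_srcs i j h w a

theorem valA_srcs_eq_pickB (g : List (List Int)) (bg : Int) (h w : Nat)
    {i j : Nat} (hi : i < h) (hj : j < w) :
    valA g bg (srcs h w) i j = pickB g bg h w i j := by
  unfold valA pickB
  by_cases hg : idx2 g i j ≠ bg
  · rw [if_pos hg, if_pos hg]
  · rw [if_neg hg, if_neg hg]
    congr 1
    rw [show (([-1, 0, 1] : List Int).flatMap (fun dr =>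
        ([-1, 0, 1] : List Int).map (fun dc => (dr, dc)))) = offs from rfl]
    have hsupport : ∀ a, writerTo g bg i j a ≠ none → adjP i j a = true := by
      intro a ha
      unfold writerTo at ha
      split at ha
      · rename_i hc; exact hc.1
      · simp at ha
    calc List.findSome? (writerTo g bg i j) (srcs h w)
        = List.findSome? (writerTo g bg i j) ((srcs h w).filter (adjP i j)) :=
          (findSome?_filter_support _ _ hsupport (srcs h w)).symm
      _ = List.findSome? (writerTo g bg i j) (offs.filterMap (toCell i j h w)) := by
          rw [box_eq]
      _ = List.findSome? (fun o => (toCell i j h w o).bind (writerTo g bg i j)) offs :=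
          findSome?_filterMap _ _ offs
      _ = _ := by
          apply findSome?_congr_mem
          intro o ho
          have hoabs := (mem_offs o).mp ho
          unfold toCell
          by_cases hb : 0 ≤ (i : Int) + o.1 ∧ (i : Int) + o.1 < (h : Int) ∧
              0 ≤ (j : Int) + o.2 ∧ (j : Int) + o.2 < (w : Int)
          · rw [if_pos hb]
            show writerTo g bg i j (((i : Int) + o.1).toNat, ((j : Int) + o.2).toNat) = _
            unfold writerTo
            have hadj : adjP i j (((i : Int) + o.1).toNat, ((j : Int) + o.2).toNat) = true := by
              simp only [adjP, Bool.and_eq_true, decide_eq_true_eq]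
              constructor <;> omega
            by_cases hgn : idx2 g ((i : Int) + o.1).toNat ((j : Int) + o.2).toNat ≠ bg
            · rw [if_pos ⟨hadj, hgn⟩]
              show _ = if 0 ≤ (i : Int) + o.1 ∧ (i : Int) + o.1 < (h : Int) ∧
                  0 ≤ (j : Int) + o.2 ∧ (j : Int) + o.2 < (w : Int) ∧
                  idx2 g ((i : Int) + o.1).toNat ((j : Int) + o.2).toNat ≠ bg then
                  some (idx2 g ((i : Int) + o.1).toNat ((j : Int) + o.2).toNat) else none
              rw [if_pos ⟨hb.1, hb.2.1, hb.2.2.1, hb.2.2.2, hgn⟩]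
            · rw [if_neg (fun hc => hgn hc.2)]
              show _ = if 0 ≤ (i : Int) + o.1 ∧ (i : Int) + o.1 < (h : Int) ∧
                  0 ≤ (j : Int) + o.2 ∧ (j : Int) + o.2 < (w : Int) ∧
                  idx2 g ((i : Int) + o.1).toNat ((j : Int) + o.2).toNat ≠ bg then
                  some (idx2 g ((i : Int) + o.1).toNat ((j : Int) + o.2).toNat) else none
              rw [if_neg (fun hc => hgn hc.2.2.2.2)]
          · rw [if_neg hb]
            show none = if 0 ≤ (i : Int) + o.1 ∧ (i : Int) + o.1 < (h : Int) ∧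
                0 ≤ (j : Int) + o.2 ∧ (j : Int) + o.2 < (w : Int) ∧
                idx2 g ((i : Int) + o.1).toNat ((j : Int) + o.2).toNat ≠ bg then
                some (idx2 g ((i : Int) + o.1).toNat ((j : Int) + o.2).toNat) else none
            rw [if_neg (fun hc => hb ⟨hc.1, hc.2.1, hc.2.2.1, hc.2.2.2.1⟩)]

theorem grow_8_main : ∀ (g : List (List Int)), Pre_grow_8 g → grow_8 g = grow_8_alt g := by
  intro g hpre
  rw [grow_8_eq_gridOf g hpre]
  obtain ⟨hne, hw0, hrect⟩ := hpre
  show _ = grow_8_alt g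
  unfold grow_8_alt gridOfT
  refine List.map_congr_left (fun i hi => ?_)
  simp only [List.mem_range] at hi
  have hdrop : (g.getD i []).drop (g.headD []).length = [] := by
    apply List.drop_eq_nil_of_le
    rw [List.getD_eq_getElem g [] hi]
    exact le_of_eq (hrect g[i] (List.getElem_mem hi))
  rw [hdrop, List.append_nil]
  refine List.map_congr_left (fun j hj => ?_)
  simp only [List.mem_range] at hj
  exact valA_srcs_eq_pickB g (bgOf g) _ _ hi hj

-- ===== VERDICT (by name: the statement is the Claim_ definition above) =====
theorem grow_8_spec : Claim_equal_grow_8 := by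
  intro g _ hpre
  unfold Spec_grow_8
  exact grow_8_main g hpre
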